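-- pv_equiv track=rewrite | github.com/kisblilla/interview | secondtask.py | vertical_down
-- ===== SOURCE A (Python) =====
-- def compare(arr, obstacles):
--     for k in range(len(obstacles)):
--         obstac=(obstacles[k][0], obstacles[k][1])
--         comparison=arr==obstac
--         if comparison==True:
--             return True
--
-- def vertical_down(n, rq, cq, obstacles, counter):
--
--     i=1
--     while (rq+i)<=n:
--         arr=(rq+i,cq)
--         if compare(arr,obstacles)==True:
--                 return counter
--         counter= counter +1
--         i=i+1
--     return (counter)
-- ===== SOURCE B (Python) =====
-- def vertical_down(n, rq, cq, obstacles, counter):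
--     # one pass over obstacles: nearest obstacle row below rq in column cq, then a closed-form count
--     best = None
--     for (r, c) in obstacles:
--         if c == cq and rq < r and r <= n and (best is None or r < best):
--             best = r
--     if best is None:
--         return counter + max(n - rq, 0)
--     return counter + (best - rq - 1)
-- ===== Notes on version B (the rewrite author's own statement) =====
-- stated objective: alternative
-- what changed: Instead of walking every cell below rq and rescanning the whole obstacle list at each step, B makes a single pass over the obstacle list to find the nearest obstacle row below rq in column cq and returns the count by a closed-form formula.
import Mathlib
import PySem

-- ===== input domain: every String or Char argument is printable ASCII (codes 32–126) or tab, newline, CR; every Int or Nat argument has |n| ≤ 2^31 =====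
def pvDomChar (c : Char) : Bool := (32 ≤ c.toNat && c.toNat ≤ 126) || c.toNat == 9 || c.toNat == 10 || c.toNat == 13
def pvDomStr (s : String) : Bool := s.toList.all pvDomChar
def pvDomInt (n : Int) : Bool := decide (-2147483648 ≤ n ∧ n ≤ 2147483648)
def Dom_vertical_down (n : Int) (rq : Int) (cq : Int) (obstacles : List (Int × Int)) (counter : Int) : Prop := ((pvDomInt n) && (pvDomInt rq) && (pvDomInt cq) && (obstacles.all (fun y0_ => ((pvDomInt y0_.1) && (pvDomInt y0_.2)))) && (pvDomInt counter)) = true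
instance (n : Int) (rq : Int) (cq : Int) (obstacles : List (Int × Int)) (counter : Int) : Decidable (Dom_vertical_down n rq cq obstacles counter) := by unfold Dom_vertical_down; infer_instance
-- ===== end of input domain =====

-- B replaces A's cell-by-cell walk (each step rescanning all obstacles) by one
-- pass over the obstacle list plus a closed-form count (objective 'alternative').

-- ===== PORT A =====
-- Python 'compare': returns True at the first matching obstacle, otherwise None.
def compareA (arr : Int × Int) (obstacles : List (Int × Int)) : Option Bool :=
  match obstacles with
  | [] => none
  | o :: rest => if arr = (o.1, o.2) then some true else compareA arr rest

-- the 'while (rq+i)<=n' loop of A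
def vdLoop (n : Int) (rq : Int) (cq : Int) (obstacles : List (Int × Int)) (counter : Int) (i : Int) : Int :=
  if h : rq + i ≤ n then
    if compareA (rq + i, cq) obstacles = some true then counter
    else vdLoop n rq cq obstacles (counter + 1) (i + 1)
  else counter
termination_by (n - (rq + i) + 1).toNat
decreasing_by omega

def vertical_down (n : Int) (rq : Int) (cq : Int) (obstacles : List (Int × Int)) (counter : Int) : Int :=
  vdLoop n rq cq obstacles counter 1

-- ===== PORT B =====
-- loop body of B: keep the smallest obstacle row in column cq with rq < r ≤ n
def bestUpd (n : Int) (rq : Int) (cq : Int) (best : Option Int) (rc : Int × Int) : Option Int :=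
  match best with
  | none => if rc.2 = cq ∧ rq < rc.1 ∧ rc.1 ≤ n then some rc.1 else none
  | some b => if rc.2 = cq ∧ rq < rc.1 ∧ rc.1 ≤ n ∧ rc.1 < b then some rc.1 else some b

def vertical_down_alt (n : Int) (rq : Int) (cq : Int) (obstacles : List (Int × Int)) (counter : Int) : Int :=
  match obstacles.foldl (bestUpd n rq cq) none with
  | none => counter + max (n - rq) 0
  | some b => counter + (b - rq - 1)

-- ===== PRECONDITION & SPEC =====
def Spec_vertical_down (n : Int) (rq : Int) (cq : Int) (obstacles : List (Int × Int)) (counter : Int) (out : Int) : Prop := out = vertical_down_alt n rq cq obstacles counter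
instance (n : Int) (rq : Int) (cq : Int) (obstacles : List (Int × Int)) (counter : Int) (out : Int) : Decidable (Spec_vertical_down n rq cq obstacles counter out) := by unfold Spec_vertical_down; infer_instance

-- ===== CLAIM (what is proved, stated in full; the proofs are below) =====
def Claim_equal_vertical_down : Prop := ∀ (n : Int) (rq : Int) (cq : Int) (obstacles : List (Int × Int)) (counter : Int), Dom_vertical_down n rq cq obstacles counter → Spec_vertical_down n rq cq obstacles counter (vertical_down n rq cq obstacles counter)

-- ===== LEMMAS AND PROOFS =====

-- compareA finds exactly list membership
lemma compareA_mem (a : Int × Int) (l : List (Int × Int)) :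
    compareA a l = some true ↔ a ∈ l := by
  induction l with
  | nil => simp [compareA]
  | cons o rest ih =>
      simp only [compareA, List.mem_cons, Prod.mk.eta]
      split_ifs with h
      · simp [h]
      · simp [ih, h]

-- once best = some (rq+1), it stays
lemma best_keep (n rq cq : Int) (l : List (Int × Int)) :
    l.foldl (bestUpd n rq cq) (some (rq + 1)) = some (rq + 1) := by
  induction l with
  | nil => rfl
  | cons x rest ih =>
      have hstep : bestUpd n rq cq (some (rq + 1)) x = some (rq + 1) := by
        simp only [bestUpd]
        split_ifs with h
        · exfalso; omega
        · rfl
      simpa [hstep] using ih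

-- any best produced by bestUpd from an acc ≥ rq+1 is itself ≥ rq+1
lemma bestUpd_ge (n rq cq : Int) (acc : Option Int) (x : Int × Int)
    (hacc : ∀ b, acc = some b → rq + 1 ≤ b) :
    ∀ b, bestUpd n rq cq acc x = some b → rq + 1 ≤ b := by
  intro b hb
  cases acc with
  | none =>
      simp only [bestUpd] at hb
      by_cases h : x.2 = cq ∧ rq < x.1 ∧ x.1 ≤ n
      · rw [if_pos h] at hb
        injection hb with hb'
        omega
      · rw [if_neg h] at hb
        exact absurd hb (by simp)
  | some b0 =>
      simp only [bestUpd] at hb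
      by_cases h : x.2 = cq ∧ rq < x.1 ∧ x.1 ≤ n ∧ x.1 < b0
      · rw [if_pos h] at hb
        injection hb with hb'
        omega
      · rw [if_neg h] at hb
        injection hb with hb'
        exact hb' ▸ hacc b0 rfl

-- if the cell just below is an obstacle, best ends at rq+1
lemma best_find (n rq cq : Int) (l : List (Int × Int)) (hn : rq + 1 ≤ n) :
    ∀ acc : Option Int, (rq + 1, cq) ∈ l → (∀ b, acc = some b → rq + 1 ≤ b) →
    l.foldl (bestUpd n rq cq) acc = some (rq + 1) := by
  induction l with
  | nil => intro acc h _; simp at h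
  | cons x rest ih =>
      intro acc hmem hacc
      rcases List.mem_cons.mp hmem with hx | hx
      · subst hx
        have hstep : bestUpd n rq cq acc (rq + 1, cq) = some (rq + 1) := by
          cases acc with
          | none => simp [bestUpd, hn]
          | some b =>
              have hb : rq + 1 ≤ b := hacc b rfl
              simp only [bestUpd]
              by_cases hlt : rq + 1 < b
              · rw [if_pos ⟨trivial, by omega, hn, hlt⟩]
              · have hbe : b = rq + 1 := by omega
                subst hbe
                rw [if_neg (fun hcond => lt_irrefl _ hcond.2.2.2)]
        simpa [List.foldl_cons, hstep] using best_keep n rq cq rest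
      · simpa [List.foldl_cons] using
          ih (bestUpd n rq cq acc x) hx (bestUpd_ge n rq cq acc x hacc)

-- below the grid nothing qualifies: best stays none
lemma best_none (n rq cq : Int) (l : List (Int × Int)) (hn : n < rq + 1) :
    l.foldl (bestUpd n rq cq) none = none := by
  induction l with
  | nil => rfl
  | cons x rest ih =>
      have hstep : bestUpd n rq cq none x = none := by
        simp only [bestUpd]
        split_ifs with h
        · exfalso; omega
        · rfl
      simpa [hstep] using ih

-- no obstacle at (rq+1, cq): the fold for rq and for rq+1 agree
lemma best_shift (n rq cq : Int) (l : List (Int × Int)) :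
    ∀ acc : Option Int, (rq + 1, cq) ∉ l →
    l.foldl (bestUpd n rq cq) acc = l.foldl (bestUpd n (rq + 1) cq) acc := by
  induction l with
  | nil => intro acc _; rfl
  | cons x rest ih =>
      intro acc hmem
      have hx : x ≠ (rq + 1, cq) := fun h => hmem (by simp [h])
      have hne : ¬ (x.1 = rq + 1 ∧ x.2 = cq) := by
        intro h
        exact hx (Prod.ext_iff.mpr ⟨h.1, h.2⟩)
      have hstep : bestUpd n rq cq acc x = bestUpd n (rq + 1) cq acc x := by
        cases acc with
        | none =>
            simp only [bestUpd]
            by_cases hc : x.2 = cq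
            · have h1 : x.1 ≠ rq + 1 := fun h => hne ⟨h, hc⟩
              split_ifs with ha hb hb
              · rfl
              · exfalso; omega
              · exfalso; omega
              · rfl
            · split_ifs with ha hb hb
              · exact absurd ha.1 hc
              · exact absurd ha.1 hc
              · exact absurd hb.1 hc
              · rfl
        | some b =>
            simp only [bestUpd]
            by_cases hc : x.2 = cq
            · have h1 : x.1 ≠ rq + 1 := fun h => hne ⟨h, hc⟩
              split_ifs with ha hb hb
              · rfl
              · exfalso; omega
              · exfalso; omega
              · rfl
            · split_ifs with ha hb hb
              · exact absurd ha.1 hc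
              · exact absurd ha.1 hc
              · exact absurd hb.1 hc
              · rfl
      have hmem' : (rq + 1, cq) ∉ rest := fun h => hmem (List.mem_cons_of_mem _ h)
      simp only [List.foldl_cons, hstep]
      exact ih _ hmem'

-- stepping past a free cell: advance rq, bump counter
lemma alt_step (n rq cq counter : Int) (l : List (Int × Int))
    (hn : rq + 1 ≤ n) (hmem : (rq + 1, cq) ∉ l) :
    vertical_down_alt n rq cq l counter = vertical_down_alt n (rq + 1) cq l (counter + 1) := by
  unfold vertical_down_alt
  rw [best_shift n rq cq l none hmem]
  cases h : l.foldl (bestUpd n (rq + 1) cq) none with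
  | none => simp only; omega
  | some b => simp only; omega

-- the while loop of A equals B's closed form, for any loop position i
lemma vdLoop_eq (n rq cq : Int) (l : List (Int × Int)) :
    ∀ (fuel : Nat) (counter i : Int), (n - (rq + i)).toNat ≤ fuel →
    vdLoop n rq cq l counter i = vertical_down_alt n (rq + i - 1) cq l counter := by
  intro fuel
  induction fuel with
  | zero =>
      intro counter i hf
      rw [vdLoop.eq_def]
      by_cases h : rq + i ≤ n
      · simp only [h, dif_pos]
        by_cases hc : compareA (rq + i, cq) l = some true
        · have hm : (rq + i - 1 + 1, cq) ∈ l := by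
            have := (compareA_mem (rq + i, cq) l).mp hc
            simpa using this
          have hbf := best_find n (rq + i - 1) cq l (by omega) none hm (by simp)
          rw [if_pos hc]
          unfold vertical_down_alt
          rw [hbf]
          show counter = counter + (rq + i - 1 + 1 - (rq + i - 1) - 1)
          omega
        · rw [if_neg hc, vdLoop.eq_def]
          have h2 : ¬ rq + (i + 1) ≤ n := by omega
          rw [dif_neg h2]
          by_cases hm : (rq + i - 1 + 1, cq) ∈ l
          · exact absurd ((compareA_mem _ l).mpr (by simpa using hm)) hc
          · unfold vertical_down_alt
            rw [best_shift n (rq + i - 1) cq l none hm,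
                best_none n (rq + i - 1 + 1) cq l (by omega)]
            simp only
            omega
      · rw [dif_neg h]
        unfold vertical_down_alt
        rw [best_none n (rq + i - 1) cq l (by omega)]
        simp only
        omega
  | succ fuel ih =>
      intro counter i hf
      rw [vdLoop.eq_def]
      by_cases h : rq + i ≤ n
      · simp only [h, dif_pos]
        by_cases hc : compareA (rq + i, cq) l = some true
        · have hm : (rq + i - 1 + 1, cq) ∈ l := by
            have := (compareA_mem (rq + i, cq) l).mp hc
            simpa using this
          have hbf := best_find n (rq + i - 1) cq l (by omega) none hm (by simp)
          rw [if_pos hc]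
          unfold vertical_down_alt
          rw [hbf]
          show counter = counter + (rq + i - 1 + 1 - (rq + i - 1) - 1)
          omega
        · rw [if_neg hc]
          have hm : (rq + i - 1 + 1, cq) ∉ l := fun hmm =>
            hc ((compareA_mem _ l).mpr (by simpa using hmm))
          rw [ih (counter + 1) (i + 1) (by omega)]
          have hsh : rq + (i + 1) - 1 = (rq + i - 1) + 1 := by ring
          rw [hsh]
          exact (alt_step n (rq + i - 1) cq counter l (by omega) hm).symm
      · rw [dif_neg h]
        unfold vertical_down_alt
        rw [best_none n (rq + i - 1) cq l (by omega)]
        simp only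
        omega

-- ===== VERDICT (by name: the statement is the Claim_ definition above) =====
theorem vertical_down_spec : Claim_equal_vertical_down := by
  intro n rq cq obstacles counter _
  unfold Spec_vertical_down vertical_down
  have h := vdLoop_eq n rq cq obstacles (n - (rq + 1)).toNat counter 1 (le_refl _)
  simpa using h
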